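-- pv_equiv track=rewrite | github.com/ethanjensen/ejensen18.github.io | calculate_modular_forms.py | listmult
-- ===== SOURCE A (Python) =====
-- def listmult(lists):
--     newlist = lists[0]
--     for i in range(1, len(lists)):
--         templist = []
--         for j in range(0, len(newlist)):
--             c = 0
--             for k in range(0, j+1):
--                 c = c + newlist[k]*lists[i][j-k]
--             templist.append(c)
--         newlist = templist
--     return newlist
-- ===== SOURCE B (Python) =====
-- def listmult(lists):
--     acc = lists[0]
--     for other in lists[1:]:
--         n = len(acc)
--         head = other[:n]
--         r = [0] * n
--         for a in reversed(acc):
--             r = [a * b + c for b, c in zip(head, [0] + r[:n-1])]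
--         acc = r
--     return acc
-- ===== Notes on version B (the rewrite author's own statement) =====
-- stated objective: alternative
-- what changed: Replaces the per-coefficient gather (index j with an inner scan over k and explicit index arithmetic newlist[k]*lists[i][j-k]) by a truncated Horner shift-and-add scheme: each step folds over the accumulated coefficients in reverse, updating the whole length-n result vector by r = a*head + x*r (a zip, no index arithmetic).
-- outside the precondition, e.g. on listmult([[1, 2], [3]]): A raises IndexError, B returns [3]; on listmult([]): A raises IndexError, B raises IndexError
import Mathlib
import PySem

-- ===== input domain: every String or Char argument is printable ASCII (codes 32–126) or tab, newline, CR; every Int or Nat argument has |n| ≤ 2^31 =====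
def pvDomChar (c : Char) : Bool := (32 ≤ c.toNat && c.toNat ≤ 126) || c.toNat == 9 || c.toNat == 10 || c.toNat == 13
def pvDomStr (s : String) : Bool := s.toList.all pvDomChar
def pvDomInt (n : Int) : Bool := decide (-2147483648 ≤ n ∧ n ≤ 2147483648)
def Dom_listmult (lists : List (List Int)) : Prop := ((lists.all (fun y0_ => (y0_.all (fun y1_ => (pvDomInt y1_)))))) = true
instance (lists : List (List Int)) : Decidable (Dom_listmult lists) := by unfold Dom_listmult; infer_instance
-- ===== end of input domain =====

-- B replaces A's per-coefficient gather loops (index arithmetic newlist[k]*lists[i][j-k])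
-- by a truncated Horner shift-and-add scheme over whole coefficient vectors; objective: alternative.

-- ===== PORT A =====
-- inner loop: c = 0; for k in range(0, j+1): c = c + newlist[k]*lists[i][j-k]
-- (all indices are non-negative; under Pre_ they are in range, so getD is exact)
def listmultInner (newlist other : List Int) (j : Nat) : Int :=
  (List.range (j+1)).foldl (fun c k => c + newlist.getD k 0 * other.getD (j-k) 0) 0

-- middle loop: templist = []; for j in range(0, len(newlist)): templist.append(c)
def listmultStep (newlist other : List Int) : List Int :=
  (List.range newlist.length).foldl
    (fun templist j => templist ++ [listmultInner newlist other j]) []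

-- outer loop over lists[1:]; lists[0] raises IndexError on [], which Pre_ excludes
def listmult (lists : List (List Int)) : List Int :=
  match lists with
  | [] => []
  | first :: rest => rest.foldl listmultStep first

-- ===== PORT B =====
-- one Horner update: r = [a*b + c for b, c in zip(head, [0] + r[:n-1])]
def hornerStep (n : Nat) (head : List Int) (r : List Int) (a : Int) : List Int :=
  List.zipWith (fun b c => a * b + c) head (0 :: r.take (n-1))

-- one product: head = other[:n]; r = [0]*n; for a in reversed(acc): r = ...
def listmultMul (acc other : List Int) : List Int :=
  let n := acc.length
  let head := other.take n
  acc.reverse.foldl (hornerStep n head) (List.replicate n 0)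

def listmult_alt (lists : List (List Int)) : List Int :=
  match lists with
  | [] => []
  | first :: rest => rest.foldl listmultMul first

-- ===== PRECONDITION & SPEC =====
-- Pre_ excludes exactly the inputs where A raises IndexError: the empty list (lists[0]),
-- and any later factor shorter than lists[0] (the access lists[i][j-k] runs off its end).
def Pre_listmult (lists : List (List Int)) : Prop :=
  lists ≠ [] ∧ ∀ l ∈ lists.tail, (lists.headD []).length ≤ l.length
instance (lists : List (List Int)) : Decidable (Pre_listmult lists) := by
  unfold Pre_listmult; infer_instance

def pvWitness_listmult : List (List Int) := [[1, 2], [3, 4]]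

def Spec_listmult (lists : List (List Int)) (out : List Int) : Prop := out = listmult_alt lists
instance (lists : List (List Int)) (out : List Int) : Decidable (Spec_listmult lists out) := by
  unfold Spec_listmult; infer_instance

-- ===== CLAIM (what is proved, stated in full; the proofs are below) =====
def Claim_equal_listmult : Prop :=
  ∀ (lists : List (List Int)), Dom_listmult lists → Pre_listmult lists →
    Spec_listmult lists (listmult lists)

-- ===== LEMMAS AND PROOFS =====

-- the common coefficient formula
def coefSum (l h : List Int) (j : Nat) : Int :=
  ∑ k ∈ Finset.range (j+1), l.getD k 0 * h.getD (j-k) 0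

theorem foldl_add_eq_sum (f : Nat → Int) (m : Nat) (init : Int) :
    (List.range m).foldl (fun c k => c + f k) init = init + ∑ k ∈ Finset.range m, f k := by
  induction m generalizing init with
  | zero => simp
  | succ m ih =>
      rw [List.range_succ, List.foldl_append, ih, Finset.sum_range_succ]
      simp [add_assoc]

theorem inner_eq (newlist other : List Int) (j : Nat) :
    listmultInner newlist other j = coefSum newlist other j := by
  unfold listmultInner coefSum
  rw [foldl_add_eq_sum]; simp

theorem step_eq_map (newlist other : List Int) :
    listmultStep newlist other
      = (List.range newlist.length).map (coefSum newlist other) := by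
  unfold listmultStep
  rw [PySem.List.foldl_append_singleton_eq_map]
  simp [inner_eq]

-- B's inner fold, rewritten structurally (foldl over reverse = foldr)
def haux (n : Nat) (head : List Int) (l : List Int) : List Int :=
  l.foldr (fun a r => hornerStep n head r a) (List.replicate n 0)

theorem listmultMul_eq_haux (acc other : List Int) :
    listmultMul acc other = haux acc.length (other.take acc.length) acc := by
  unfold listmultMul haux
  rw [List.foldl_reverse]

theorem haux_length (n : Nat) (head l : List Int) (hh : head.length = n) :
    (haux n head l).length = n := by
  induction l with
  | nil => simp [haux]
  | cons a l ih =>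
      show (hornerStep n head (haux n head l) a).length = n
      simp [hornerStep, List.length_zipWith, List.length_take, hh, ih]
      omega

theorem coefSum_cons (a : Int) (l head : List Int) (j : Nat) :
    coefSum (a :: l) head (j+1) = a * head.getD (j+1) 0 + coefSum l head j := by
  unfold coefSum
  rw [Finset.sum_range_succ']
  simp only [List.getD_cons_succ, Nat.succ_sub_succ, List.getD_cons_zero, Nat.sub_zero]
  ring

theorem haux_getD (n : Nat) (head l : List Int) (hh : head.length = n) :
    ∀ j, j < n → (haux n head l).getD j 0 = coefSum l head j := by
  induction l with
  | nil =>
      intro j hj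
      simp [haux, coefSum, List.getD]
  | cons a l ih =>
      intro j hj
      have hr : (haux n head l).length = n := haux_length n head l hh
      show (hornerStep n head (haux n head l) a).getD j 0 = _
      have hlen : (hornerStep n head (haux n head l) a).length = n := by
        simp [hornerStep, List.length_zipWith, List.length_take, hr, hh]; omega
      have hgl := List.getD_eq_getElem (hornerStep n head (haux n head l) a) 0
        (n := j) (by omega)
      rw [hgl]
      unfold hornerStep
      simp only [List.getElem_zipWith]
      cases j with
      | zero =>
          simp [coefSum, List.getElem?_eq_getElem (show 0 < head.length by omega)]
      | succ j' =>
          have hj' : j' < n - 1 := by omega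
          have h1 : (0 :: (haux n head l).take (n-1))[j'+1]'(by simp [hr]; omega)
              = (haux n head l).getD j' 0 := by
            simp only [List.getElem_cons_succ]
            rw [List.getElem_take, List.getD_eq_getElem _ _ (by omega)]
          rw [h1, ih j' (by omega), coefSum_cons,
            List.getD_eq_getElem head (n := j'+1) 0 (by omega)]

theorem mul_eq_step (acc other : List Int) (hlen : acc.length ≤ other.length) :
    listmultMul acc other = listmultStep acc other := by
  have hh : (other.take acc.length).length = acc.length := by
    simp [List.length_take]; omega
  rw [listmultMul_eq_haux, step_eq_map]
  apply List.ext_getElem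
  · rw [haux_length _ _ _ hh]; simp
  · intro j h1 h2
    have hjn : j < acc.length := by rw [haux_length _ _ _ hh] at h1; exact h1
    have := haux_getD acc.length (other.take acc.length) acc hh j hjn
    rw [List.getD_eq_getElem _ _ h1] at this
    rw [this]
    simp only [List.getElem_map, List.getElem_range]
    unfold coefSum
    apply Finset.sum_congr rfl
    intro k hk
    have hjk : j - k < acc.length := by omega
    congr 1
    rw [List.getD_eq_getElem (other.take acc.length) 0 (n := j-k) (by omega),
        List.getD_eq_getElem other 0 (n := j-k) (by omega), List.getElem_take]

theorem listmultStep_length (newlist other : List Int) :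
    (listmultStep newlist other).length = newlist.length := by
  rw [step_eq_map]; simp

theorem fold_eq (rest : List (List Int)) :
    ∀ newlist : List Int, (∀ l ∈ rest, newlist.length ≤ l.length) →
      rest.foldl listmultStep newlist = rest.foldl listmultMul newlist := by
  induction rest with
  | nil => intro _ _; rfl
  | cons other rest ih =>
      intro newlist h
      simp only [List.foldl_cons]
      rw [mul_eq_step newlist other (h other (by simp))]
      rw [← mul_eq_step newlist other (h other (by simp))] -- keep B's fold on B's step
      rw [mul_eq_step newlist other (h other (by simp))]
      apply ih
      intro l hl
      rw [listmultStep_length]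
      exact h l (by simp [hl])

-- ===== VERDICT (by name: the statement is the Claim_ definition above) =====
theorem listmult_spec : Claim_equal_listmult := by
  intro lists _ hpre
  obtain ⟨hne, htail⟩ := hpre
  unfold Spec_listmult
  match lists with
  | [] => exact absurd rfl hne
  | first :: rest =>
      show rest.foldl listmultStep first = rest.foldl listmultMul first
      exact fold_eq rest first (by simpa using htail)
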